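-- pv_equiv track=rewrite | github.com/ashu433/Trading_codes | Zerodha_GUI/Kite_Zerodha-main/Kite_Zerodha-main/Weekely_Strangle.py | find_closest_indices
-- ===== SOURCE A (Python) =====
-- def find_closest_indices(input_num, num_list):
--     smaller_index = None
--     greater_index = None
--     min_diff_smaller = float('inf')
--     min_diff_greater = float('inf')
--
--     for i in range(len(num_list)):
--         diff = input_num - num_list[i]
--
--         if diff > 0 and diff < min_diff_greater:
--             min_diff_greater = diff
--             greater_index = i
--         elif diff < 0 and abs(diff) < min_diff_smaller:
--             min_diff_smaller = abs(diff)
--             smaller_index = i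
--
--     return smaller_index, greater_index
-- ===== SOURCE B (Python) =====
-- def find_closest_indices(input_num, num_list):
--     n = len(num_list)
--     greater_index = min((i for i in range(n) if num_list[i] < input_num),
--                         key=lambda i: input_num - num_list[i], default=None)
--     smaller_index = min((i for i in range(n) if num_list[i] > input_num),
--                         key=lambda i: num_list[i] - input_num, default=None)
--     return (smaller_index, greater_index)
-- ===== Notes on version B (the rewrite author's own statement) =====
-- stated objective: simpler
-- what changed: Replaced A's single fused loop over four mutable state variables with two independent filtered first-minimum reductions (min over candidate indices with a distance key, default=None), one per side.
import Mathlib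
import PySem

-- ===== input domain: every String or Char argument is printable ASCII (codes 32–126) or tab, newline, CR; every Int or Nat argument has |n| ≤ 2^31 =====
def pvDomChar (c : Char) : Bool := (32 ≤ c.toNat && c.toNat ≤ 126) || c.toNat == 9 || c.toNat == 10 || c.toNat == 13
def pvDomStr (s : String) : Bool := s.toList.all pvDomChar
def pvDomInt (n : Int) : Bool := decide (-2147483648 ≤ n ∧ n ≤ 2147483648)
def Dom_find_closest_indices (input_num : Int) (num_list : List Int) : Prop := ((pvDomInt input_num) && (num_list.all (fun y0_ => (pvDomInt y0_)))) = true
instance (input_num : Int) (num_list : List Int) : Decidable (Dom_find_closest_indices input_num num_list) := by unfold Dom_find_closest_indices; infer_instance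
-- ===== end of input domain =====

-- B replaces A's single fused loop over four state variables by two independent
-- filtered first-minimum reductions (one per side); objective: simpler decomposition.

-- ===== PORT A =====
-- 'none' represents float('inf'): any diff compares below it.
def pvLtInf (x : Int) (o : Option Int) : Bool :=
  match o with
  | none => true
  | some d => x < d

-- A's loop body: state (smaller_index, greater_index, min_diff_smaller, min_diff_greater)
def pvStepA (input_num : Int)
    (s : Option Int × Option Int × Option Int × Option Int) (p : Int × Int) :
    Option Int × Option Int × Option Int × Option Int :=
  let diff := input_num - p.2
  if diff > 0 && pvLtInf diff s.2.2.2 then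
    (s.1, some p.1, s.2.2.1, some diff)
  else if diff < 0 && pvLtInf |diff| s.2.2.1 then
    (some p.1, s.2.1, some |diff|, s.2.2.2)
  else s

def find_closest_indices (input_num : Int) (num_list : List Int) : Option Int × Option Int :=
  let st := (PySem.List.enumerate num_list).foldl (pvStepA input_num) (none, none, none, none)
  (st.1, st.2.1)

-- ===== PORT B =====
-- Python's min(..., key=..., default=None): first element with minimal key, none if empty.
def pvMinStep (acc : Option (Int × Int)) (p : Int × Int) : Option (Int × Int) :=
  match acc with
  | none => some p
  | some q => if p.2 < q.2 then some p else some q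

def pvMinKey (cands : List (Int × Int)) : Option Int :=
  (cands.foldl pvMinStep none).map Prod.fst

def find_closest_indices_alt (input_num : Int) (num_list : List Int) : Option Int × Option Int :=
  let e := PySem.List.enumerate num_list
  let greater_index :=
    pvMinKey ((e.filter (fun p => p.2 < input_num)).map (fun p => (p.1, input_num - p.2)))
  let smaller_index :=
    pvMinKey ((e.filter (fun p => p.2 > input_num)).map (fun p => (p.1, p.2 - input_num)))
  (smaller_index, greater_index)

-- ===== PRECONDITION & SPEC =====
def Spec_find_closest_indices (input_num : Int) (num_list : List Int) (out : Option Int × Option Int) : Prop := out = find_closest_indices_alt input_num num_list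
instance (input_num : Int) (num_list : List Int) (out : Option Int × Option Int) : Decidable (Spec_find_closest_indices input_num num_list out) := by unfold Spec_find_closest_indices; infer_instance

-- ===== CLAIM (what is proved, stated in full; the proofs are below) =====
def Claim_equal_find_closest_indices : Prop := ∀ (input_num : Int) (num_list : List Int), Dom_find_closest_indices input_num num_list → Spec_find_closest_indices input_num num_list (find_closest_indices input_num num_list)

-- ===== LEMMAS AND PROOFS =====

-- B's two one-sided conditional min-steps, phrased over the unfiltered enumerated list
def pvStepG (input_num : Int) (acc : Option (Int × Int)) (p : Int × Int) : Option (Int × Int) :=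
  if p.2 < input_num then pvMinStep acc (p.1, input_num - p.2) else acc

def pvStepS (input_num : Int) (acc : Option (Int × Int)) (p : Int × Int) : Option (Int × Int) :=
  if p.2 > input_num then pvMinStep acc (p.1, p.2 - input_num) else acc

def pvPack (sA gA : Option (Int × Int)) : Option Int × Option Int × Option Int × Option Int :=
  (sA.map Prod.fst, gA.map Prod.fst, sA.map Prod.snd, gA.map Prod.snd)

theorem pvStepA_pack (input_num : Int) (sA gA : Option (Int × Int)) (p : Int × Int) :
    pvStepA input_num (pvPack sA gA) p =
      pvPack (pvStepS input_num sA p) (pvStepG input_num gA p) := by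
  rcases p with ⟨i, x⟩
  rcases abs_cases (input_num - x) with ⟨he, hsign⟩ | ⟨he, hsign⟩ <;>
    rcases sA with _ | ⟨is, ks⟩ <;> rcases gA with _ | ⟨ig, kg⟩ <;>
    simp only [pvStepA, pvStepS, pvStepG, pvPack, pvMinStep, pvLtInf,
      Option.map_none, Option.map_some] <;>
    split_ifs with h1 h2 h3 h4 <;>
    simp_all <;>
    omega

theorem pvFold_decompose (input_num : Int) (e : List (Int × Int)) :
    ∀ (sA gA : Option (Int × Int)),
      e.foldl (pvStepA input_num) (pvPack sA gA) =
        pvPack (e.foldl (pvStepS input_num) sA) (e.foldl (pvStepG input_num) gA) := by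
  induction e with
  | nil => intro sA gA; rfl
  | cons p rest ih =>
      intro sA gA
      simp only [List.foldl_cons, pvStepA_pack]
      exact ih _ _

theorem pvFoldG_eq (input_num : Int) (e : List (Int × Int)) :
    ((e.filter (fun p => p.2 < input_num)).map (fun p => (p.1, input_num - p.2))).foldl
        pvMinStep none = e.foldl (pvStepG input_num) none := by
  rw [List.foldl_map, List.foldl_filter]
  apply PySem.List.foldl_congr_mem
  intro acc p _; simp [pvStepG]

theorem pvFoldS_eq (input_num : Int) (e : List (Int × Int)) :
    ((e.filter (fun p => p.2 > input_num)).map (fun p => (p.1, p.2 - input_num))).foldl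
        pvMinStep none = e.foldl (pvStepS input_num) none := by
  rw [List.foldl_map, List.foldl_filter]
  apply PySem.List.foldl_congr_mem
  intro acc p _; simp [pvStepS]

-- ===== VERDICT (by name: the statement is the Claim_ definition above) =====
theorem find_closest_indices_spec : Claim_equal_find_closest_indices := by
  intro input_num num_list _
  show find_closest_indices input_num num_list = find_closest_indices_alt input_num num_list
  dsimp only [find_closest_indices, find_closest_indices_alt, pvMinKey]
  rw [pvFoldG_eq, pvFoldS_eq]
  have h := pvFold_decompose input_num (PySem.List.enumerate num_list) none none
  simp only [pvPack, Option.map_none] at h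
  rw [h]
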